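-- pv_equiv track=rewrite | github.com/AJaySi/ALwrity | backend/services/llm_providers/smart_model_selector.py | _fallback_selection
-- ===== SOURCE A (Python) =====
-- from typing import Dict, List, Optional, Tuple
--
-- def _fallback_selection(available_providers: List[str]) -> Tuple[str, str]:
--     """Fallback selection when no specific models are suitable."""
--     # Prefer providers in this order: ollama, google, openai, anthropic, deepseek
--     fallback_order = ["ollama", "google", "openai", "anthropic", "deepseek"]
--
--     for provider in fallback_order:
--         if provider in available_providers:
--             if provider == "ollama":
--                 return "ollama", "llama3.1:8b"
--             elif provider == "google":
--                 return "google", "gemini-2.0-flash-001"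
--             elif provider == "openai":
--                 return "openai", "gpt-4o"
--             elif provider == "anthropic":
--                 return "anthropic", "claude-3-5-sonnet-20241022"
--             elif provider == "deepseek":
--                 return "deepseek", "deepseek-chat"
--
--     # Ultimate fallback
--     if available_providers:
--         provider = available_providers[0]
--         return provider, "default"
--
--     raise RuntimeError("No providers available")
-- ===== SOURCE B (Python) =====
-- def _fallback_selection(available_providers):
--     """Fallback selection when no specific models are suitable."""
--     order = ["ollama", "google", "openai", "anthropic", "deepseek"]
--     priority = {name: i for i, name in enumerate(order)}
--     models = {
--         "ollama": "llama3.1:8b",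
--         "google": "gemini-2.0-flash-001",
--         "openai": "gpt-4o",
--         "anthropic": "claude-3-5-sonnet-20241022",
--         "deepseek": "deepseek-chat",
--     }
--     if not available_providers:
--         raise RuntimeError("No providers available")
--     best = available_providers[0]
--     for p in available_providers[1:]:
--         if priority.get(p, len(order)) < priority.get(best, len(order)):
--             best = p
--     return best, models.get(best, "default")
-- ===== Notes on version B (the rewrite author's own statement) =====
-- stated objective: alternative
-- what changed: Instead of scanning the hard-coded preference list and testing membership with an if/elif chain, B builds a name->priority dict and a name->model dict and makes one pass over available_providers keeping the first element of minimal priority, then looks the model up.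
import Mathlib
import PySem

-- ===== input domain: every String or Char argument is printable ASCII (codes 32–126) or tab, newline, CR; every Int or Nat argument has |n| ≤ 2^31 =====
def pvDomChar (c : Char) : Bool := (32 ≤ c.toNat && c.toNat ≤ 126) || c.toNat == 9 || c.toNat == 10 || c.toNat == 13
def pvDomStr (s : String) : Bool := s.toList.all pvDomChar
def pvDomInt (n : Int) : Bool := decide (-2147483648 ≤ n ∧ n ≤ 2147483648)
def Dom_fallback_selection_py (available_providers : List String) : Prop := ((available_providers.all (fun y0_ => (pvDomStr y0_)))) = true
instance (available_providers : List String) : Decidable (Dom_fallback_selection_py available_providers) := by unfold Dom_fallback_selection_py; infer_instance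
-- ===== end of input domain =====

-- B replaces A's membership scan over the hard-coded preference list by a priority dict and a
-- single min-by-priority pass over available_providers (objective: alternative decomposition).

-- ===== PORT A =====
-- the for-loop over fallback_order with early return; none = fell through the loop
def pvFsLoop (available_providers : List String) : List String → Option (String × String)
  | [] => none
  | p :: rest =>
    if available_providers.contains p then
      if p = "ollama" then some ("ollama", "llama3.1:8b")
      else if p = "google" then some ("google", "gemini-2.0-flash-001")
      else if p = "openai" then some ("openai", "gpt-4o")
      else if p = "anthropic" then some ("anthropic", "claude-3-5-sonnet-20241022")
      else if p = "deepseek" then some ("deepseek", "deepseek-chat")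
      else pvFsLoop available_providers rest
    else pvFsLoop available_providers rest

def fallback_selection_py (available_providers : List String) : String × String :=
  let fallback_order := ["ollama", "google", "openai", "anthropic", "deepseek"]
  match pvFsLoop available_providers fallback_order with
  | some r => r
  | none =>
    match available_providers with
    | p :: _ => (p, "default")
    | [] => ("", "")   -- Python raises RuntimeError here; excluded by Pre_

-- ===== PORT B =====
def pvOrder : List String := ["ollama", "google", "openai", "anthropic", "deepseek"]

-- {name: i for i, name in enumerate(order)}
def pvPriority : PySem.Dict String Int :=
  PySem.Dict.ofList ((PySem.List.enumerate pvOrder).map (fun iv => (iv.2, iv.1)))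

def pvModels : PySem.Dict String String :=
  PySem.Dict.ofList
    [("ollama", "llama3.1:8b"), ("google", "gemini-2.0-flash-001"), ("openai", "gpt-4o"),
     ("anthropic", "claude-3-5-sonnet-20241022"), ("deepseek", "deepseek-chat")]

-- the loop body: keep the element of strictly smaller priority
def pvPick (best p : String) : String :=
  if pvPriority.getD p (pvOrder.length : Int) < pvPriority.getD best (pvOrder.length : Int) then p else best

def fallback_selection_py_alt (available_providers : List String) : String × String :=
  match available_providers with
  | [] => ("", "")   -- Python raises RuntimeError here; excluded by Pre_
  | b0 :: rest =>
    let best := rest.foldl pvPick b0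
    (best, pvModels.getD best "default")

-- ===== PRECONDITION & SPEC =====
-- Pre_ excludes only the empty list, on which both A and B raise RuntimeError.
def Pre_fallback_selection_py (available_providers : List String) : Prop :=
  available_providers ≠ []
instance (available_providers : List String) : Decidable (Pre_fallback_selection_py available_providers) := by unfold Pre_fallback_selection_py; infer_instance

def pvWitness_fallback_selection_py : List String := ["mistral", "google"]

def Spec_fallback_selection_py (available_providers : List String) (out : String × String) : Prop := out = fallback_selection_py_alt available_providers
instance (available_providers : List String) (out : String × String) : Decidable (Spec_fallback_selection_py available_providers out) := by unfold Spec_fallback_selection_py; infer_instance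

-- ===== CLAIM (what is proved, stated in full; the proofs are below) =====
def Claim_equal_fallback_selection_py : Prop := ∀ (available_providers : List String), Dom_fallback_selection_py available_providers → Pre_fallback_selection_py available_providers → Spec_fallback_selection_py available_providers (fallback_selection_py available_providers)

-- ===== LEMMAS AND PROOFS =====

-- the priority a provider name gets in B
def prv (s : String) : Int := pvPriority.getD s (pvOrder.length : Int)

lemma prv_def (s : String) : prv s =
    if s = "ollama" then 0 else if s = "google" then 1 else if s = "openai" then 2
    else if s = "anthropic" then 3 else if s = "deepseek" then 4 else 5 := by
  have h : pvPriority.items = [("ollama", 0), ("google", 1), ("openai", 2), ("anthropic", 3), ("deepseek", 4)] := by rfl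
  simp only [prv, PySem.Dict.getD, PySem.Dict.get?, h]
  split_ifs with h1 h2 h3 h4 h5
  · subst h1; rfl
  · subst h2; rfl
  · subst h3; rfl
  · subst h4; rfl
  · subst h5; rfl
  · simp [beq_false_of_ne (Ne.symm h1), beq_false_of_ne (Ne.symm h2),
      beq_false_of_ne (Ne.symm h3), beq_false_of_ne (Ne.symm h4),
      beq_false_of_ne (Ne.symm h5), pvOrder]

lemma models_def (s : String) : pvModels.getD s "default" =
    if s = "ollama" then "llama3.1:8b" else if s = "google" then "gemini-2.0-flash-001"
    else if s = "openai" then "gpt-4o" else if s = "anthropic" then "claude-3-5-sonnet-20241022"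
    else if s = "deepseek" then "deepseek-chat" else "default" := by
  have h : pvModels.items = [("ollama", "llama3.1:8b"), ("google", "gemini-2.0-flash-001"),
      ("openai", "gpt-4o"), ("anthropic", "claude-3-5-sonnet-20241022"), ("deepseek", "deepseek-chat")] := by rfl
  simp only [PySem.Dict.getD, PySem.Dict.get?, h]
  split_ifs with h1 h2 h3 h4 h5
  · subst h1; rfl
  · subst h2; rfl
  · subst h3; rfl
  · subst h4; rfl
  · subst h5; rfl
  · simp [beq_false_of_ne (Ne.symm h1), beq_false_of_ne (Ne.symm h2),
      beq_false_of_ne (Ne.symm h3), beq_false_of_ne (Ne.symm h4),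
      beq_false_of_ne (Ne.symm h5)]

lemma prv_bounds (s : String) : 0 ≤ prv s ∧ prv s ≤ 5 := by
  rw [prv_def]; split_ifs <;> norm_num

lemma prv_name (s : String) :
    (prv s = 0 → s = "ollama") ∧ (prv s = 1 → s = "google") ∧ (prv s = 2 → s = "openai") ∧
    (prv s = 3 → s = "anthropic") ∧ (prv s = 4 → s = "deepseek") := by
  rw [prv_def]; split_ifs <;> refine ⟨?_, ?_, ?_, ?_, ?_⟩ <;> intro h <;> first | assumption | omega

lemma prv_five (s : String) (h1 : s ≠ "ollama") (h2 : s ≠ "google") (h3 : s ≠ "openai")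
    (h4 : s ≠ "anthropic") (h5 : s ≠ "deepseek") : prv s = 5 := by
  rw [prv_def]; simp [h1, h2, h3, h4, h5]

-- invariant of B's loop: the fold returns the first element of minimal priority
lemma foldl_pick_spec (l : List String) (b : String) :
    (l.foldl pvPick b = b ∨ (l.foldl pvPick b ∈ l ∧ prv (l.foldl pvPick b) < prv b)) ∧
    (∀ x ∈ l, prv (l.foldl pvPick b) ≤ prv x) ∧ prv (l.foldl pvPick b) ≤ prv b := by
  induction l generalizing b with
  | nil => simp
  | cons a l ih =>
    simp only [List.foldl_cons]
    by_cases hab : prv a < prv b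
    · have hpick : pvPick b a = a := by simp [pvPick, prv] at hab ⊢; omega
      rw [hpick]
      obtain ⟨hmem, hbd, hle⟩ := ih a
      refine ⟨?_, ?_, by omega⟩
      · rcases hmem with h | ⟨h, hlt⟩
        · exact Or.inr ⟨by simp [h], by rw [h]; omega⟩
        · exact Or.inr ⟨by simp [h], by omega⟩
      · intro x hx
        rcases List.mem_cons.mp hx with rfl | hx
        · omega
        · exact hbd x hx
    · have hpick : pvPick b a = b := by simp [pvPick, prv] at hab ⊢; omega
      rw [hpick]
      obtain ⟨hmem, hbd, hle⟩ := ih b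
      refine ⟨?_, ?_, hle⟩
      · rcases hmem with h | ⟨h, hlt⟩
        · exact Or.inl h
        · exact Or.inr ⟨List.mem_cons_of_mem _ h, hlt⟩
      · intro x hx
        rcases List.mem_cons.mp hx with rfl | hx
        · omega
        · exact hbd x hx

-- ===== VERDICT (by name: the statement is the Claim_ definition above) =====
theorem fallback_selection_py_spec : Claim_equal_fallback_selection_py := by
  intro aps _ hpre
  unfold Spec_fallback_selection_py
  match aps with
  | [] => exact absurd rfl hpre
  | b0 :: rest =>
    obtain ⟨hmem, hbd, hle⟩ := foldl_pick_spec rest b0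
    set r := rest.foldl pvPick b0 with hr
    have hrmem : r ∈ b0 :: rest := by
      rcases hmem with h | ⟨h, _⟩
      · simp [h]
      · exact List.mem_cons_of_mem _ h
    have hbd' : ∀ x ∈ b0 :: rest, prv r ≤ prv x := by
      intro x hx
      rcases List.mem_cons.mp hx with rfl | hx
      · exact hle
      · exact hbd x hx
    have hrhs : fallback_selection_py_alt (b0 :: rest) = (r, pvModels.getD r "default") := by
      simp [fallback_selection_py_alt, hr]
    by_cases h0 : "ollama" ∈ b0 :: rest
    · have : prv r = 0 := by
        have h := hbd' _ h0
        have hb := (prv_bounds r).1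
        have : prv "ollama" = 0 := by simp [prv_def]
        omega
      have hre : r = "ollama" := (prv_name r).1 this
      simp [fallback_selection_py, pvFsLoop, h0, hrhs, hre, models_def]
    by_cases h1 : "google" ∈ b0 :: rest
    · have hne : prv r ≠ 0 := fun h => h0 (by rw [← (prv_name r).1 h]; exact hrmem)
      have : prv r = 1 := by
        have h := hbd' _ h1
        have hb := (prv_bounds r).1
        have : prv "google" = 1 := by simp [prv_def]
        omega
      have hre : r = "google" := (prv_name r).2.1 this
      simp [fallback_selection_py, pvFsLoop, h0, h1, hrhs, hre, models_def]
    by_cases h2 : "openai" ∈ b0 :: rest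
    · have hne0 : prv r ≠ 0 := fun h => h0 (by rw [← (prv_name r).1 h]; exact hrmem)
      have hne1 : prv r ≠ 1 := fun h => h1 (by rw [← (prv_name r).2.1 h]; exact hrmem)
      have : prv r = 2 := by
        have h := hbd' _ h2
        have hb := (prv_bounds r).1
        have : prv "openai" = 2 := by simp [prv_def]
        omega
      have hre : r = "openai" := (prv_name r).2.2.1 this
      simp [fallback_selection_py, pvFsLoop, h0, h1, h2, hrhs, hre, models_def]
    by_cases h3 : "anthropic" ∈ b0 :: rest
    · have hne0 : prv r ≠ 0 := fun h => h0 (by rw [← (prv_name r).1 h]; exact hrmem)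
      have hne1 : prv r ≠ 1 := fun h => h1 (by rw [← (prv_name r).2.1 h]; exact hrmem)
      have hne2 : prv r ≠ 2 := fun h => h2 (by rw [← (prv_name r).2.2.1 h]; exact hrmem)
      have : prv r = 3 := by
        have h := hbd' _ h3
        have hb := (prv_bounds r).1
        have : prv "anthropic" = 3 := by simp [prv_def]
        omega
      have hre : r = "anthropic" := (prv_name r).2.2.2.1 this
      simp [fallback_selection_py, pvFsLoop, h0, h1, h2, h3, hrhs, hre, models_def]
    by_cases h4 : "deepseek" ∈ b0 :: rest
    · have hne0 : prv r ≠ 0 := fun h => h0 (by rw [← (prv_name r).1 h]; exact hrmem)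
      have hne1 : prv r ≠ 1 := fun h => h1 (by rw [← (prv_name r).2.1 h]; exact hrmem)
      have hne2 : prv r ≠ 2 := fun h => h2 (by rw [← (prv_name r).2.2.1 h]; exact hrmem)
      have hne3 : prv r ≠ 3 := fun h => h3 (by rw [← (prv_name r).2.2.2.1 h]; exact hrmem)
      have : prv r = 4 := by
        have h := hbd' _ h4
        have hb := (prv_bounds r).1
        have : prv "deepseek" = 4 := by simp [prv_def]
        omega
      have hre : r = "deepseek" := (prv_name r).2.2.2.2 this
      simp [fallback_selection_py, pvFsLoop, h0, h1, h2, h3, h4, hrhs, hre, models_def]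
    · -- no preferred provider available: A returns (b0, "default"), B's fold never replaces b0
      have hb5 : prv b0 = 5 := prv_five b0
        (fun h => h0 (by rw [← h]; exact List.mem_cons_self))
        (fun h => h1 (by rw [← h]; exact List.mem_cons_self))
        (fun h => h2 (by rw [← h]; exact List.mem_cons_self))
        (fun h => h3 (by rw [← h]; exact List.mem_cons_self))
        (fun h => h4 (by rw [← h]; exact List.mem_cons_self))
      have hrb : r = b0 := by
        rcases hmem with h | ⟨h, hlt⟩
        · exact h
        · -- prv r < 5 would force r to be a preferred name, all of which are absent
          exfalso
          have hb := (prv_bounds r).1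
          have hrm : r ∈ b0 :: rest := List.mem_cons_of_mem _ h
          rw [hb5] at hlt
          interval_cases h' : (prv r)
          · exact h0 (by rw [← (prv_name r).1 h']; exact hrm)
          · exact h1 (by rw [← (prv_name r).2.1 h']; exact hrm)
          · exact h2 (by rw [← (prv_name r).2.2.1 h']; exact hrm)
          · exact h3 (by rw [← (prv_name r).2.2.2.1 h']; exact hrm)
          · exact h4 (by rw [← (prv_name r).2.2.2.2 h']; exact hrm)
      have n0 : b0 ≠ "ollama" := fun h => h0 (by rw [← h]; exact List.mem_cons_self)
      have n1 : b0 ≠ "google" := fun h => h1 (by rw [← h]; exact List.mem_cons_self)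
      have n2 : b0 ≠ "openai" := fun h => h2 (by rw [← h]; exact List.mem_cons_self)
      have n3 : b0 ≠ "anthropic" := fun h => h3 (by rw [← h]; exact List.mem_cons_self)
      have n4 : b0 ≠ "deepseek" := fun h => h4 (by rw [← h]; exact List.mem_cons_self)
      have hmod : pvModels.getD b0 "default" = "default" := by
        rw [models_def]; simp [n0, n1, n2, n3, n4]
      simp [fallback_selection_py, pvFsLoop, h0, h1, h2, h3, h4, hrhs, hrb, hmod]
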